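-- pv_equiv track=rewrite | github.com/didizhu-judy/LLaVAOV2.0-Caption2VQA_V2 | scripts/data/classify_openbee_domains.py | infer_domain_from_content
-- ===== SOURCE A (Python) =====
-- def infer_domain_from_content(contents: list[str], keyword_hints: dict[str, list]) -> list[str]:
--     added = set()
--     text = " ".join(contents).lower()
--     for keyword, domains in (keyword_hints or {}).items():
--         if keyword.lower() in text:
--             for d in domains:
--                 added.add(d)
--     return sorted(added)
-- ===== SOURCE B (Python) =====
-- def _insert_new(d, xs):
--     """Insert d into the strictly increasing sorted list xs; no-op if present."""
--     for i, x in enumerate(xs):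
--         if d < x:
--             return xs[:i] + [d] + xs[i:]
--         if d == x:
--             return xs
--     return xs + [d]
--
--
-- def infer_domain_from_content(contents: list[str], keyword_hints: dict[str, list]) -> list[str]:
--     text = " ".join(contents).lower()
--     out = []
--     for keyword, domains in (keyword_hints or {}).items():
--         if keyword.lower() in text:
--             for d in domains:
--                 out = _insert_new(d, out)
--     return out
-- ===== Notes on version B (the rewrite author's own statement) =====
-- stated objective: alternative
-- what changed: B keeps no set and never sorts at the end: it maintains the result directly as a strictly increasing duplicate-free list by ordered insertion of each matched domain, instead of A's set accumulation followed by a final sorted().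
import Mathlib
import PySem

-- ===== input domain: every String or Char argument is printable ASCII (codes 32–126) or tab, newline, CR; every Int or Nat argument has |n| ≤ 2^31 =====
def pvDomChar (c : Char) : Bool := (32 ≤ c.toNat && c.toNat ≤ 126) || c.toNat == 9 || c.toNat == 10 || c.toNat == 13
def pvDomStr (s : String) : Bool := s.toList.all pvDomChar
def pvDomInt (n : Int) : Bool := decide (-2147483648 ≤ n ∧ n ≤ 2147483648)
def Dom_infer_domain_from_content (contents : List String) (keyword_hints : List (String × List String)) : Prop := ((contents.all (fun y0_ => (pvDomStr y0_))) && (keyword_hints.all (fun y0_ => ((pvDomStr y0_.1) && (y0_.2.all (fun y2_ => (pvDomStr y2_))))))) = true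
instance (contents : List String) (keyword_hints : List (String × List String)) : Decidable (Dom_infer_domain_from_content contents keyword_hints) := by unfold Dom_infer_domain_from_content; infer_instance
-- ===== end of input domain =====

-- B replaces A's set-then-sorted() with ordered insertion into a strictly increasing
-- duplicate-free result list (alternative decomposition, same cost class).


-- ===== PORT A =====
-- 'keyword_hints or {}' iterates exactly the given pairs (an empty dict iterates nothing anyway)
def infer_domain_from_content (contents : List String) (keyword_hints : List (String × List String)) : List String :=
  let text := PySem.Str.lower (PySem.Str.join " " contents)
  let added : PySem.Set String :=
    keyword_hints.foldl
      (fun s p =>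
        if PySem.Str.isIn (PySem.Str.lower p.1) text then
          p.2.foldl PySem.Set.add s
        else s)
      PySem.Set.empty
  PySem.List.sorted added (fun x => x) false

-- ===== PORT B =====
-- insert d into a strictly increasing sorted list; no-op if already present (Source B's _insert_new)
def pvInsNew (d : String) : List String → List String
  | [] => [d]
  | x :: xs => if d < x then d :: x :: xs else if d = x then x :: xs else x :: pvInsNew d xs

def infer_domain_from_content_alt (contents : List String) (keyword_hints : List (String × List String)) : List String :=
  let text := PySem.Str.lower (PySem.Str.join " " contents)
  keyword_hints.foldl
    (fun out p =>
      if PySem.Str.isIn (PySem.Str.lower p.1) text then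
        p.2.foldl (fun acc d => pvInsNew d acc) out
      else out)
    []

-- ===== PRECONDITION & SPEC =====
def Spec_infer_domain_from_content (contents : List String) (keyword_hints : List (String × List String)) (out : List String) : Prop := out = infer_domain_from_content_alt contents keyword_hints
instance (contents : List String) (keyword_hints : List (String × List String)) (out : List String) : Decidable (Spec_infer_domain_from_content contents keyword_hints out) := by unfold Spec_infer_domain_from_content; infer_instance

-- ===== CLAIM (what is proved, stated in full; the proofs are below) =====
def Claim_equal_infer_domain_from_content : Prop := ∀ (contents : List String) (keyword_hints : List (String × List String)), Dom_infer_domain_from_content contents keyword_hints → Spec_infer_domain_from_content contents keyword_hints (infer_domain_from_content contents keyword_hints)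

-- ===== LEMMAS AND PROOFS =====

theorem pvInsNew_mem {d y : String} {L : List String} :
    y ∈ pvInsNew d L ↔ y = d ∨ y ∈ L := by
  induction L with
  | nil => simp [pvInsNew]
  | cons x xs ih =>
    simp only [pvInsNew]
    split_ifs with h1 h2
    · simp
    · subst h2; simp only [List.mem_cons]; tauto
    · simp [ih]; tauto

theorem pvInsNew_pairwise {d : String} {L : List String}
    (h : L.Pairwise (· < ·)) : (pvInsNew d L).Pairwise (· < ·) := by
  induction L with
  | nil => simp [pvInsNew]
  | cons x xs ih =>
    rcases List.pairwise_cons.mp h with ⟨hx, hxs⟩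
    simp only [pvInsNew]
    split_ifs with h1 h2
    · exact List.pairwise_cons.mpr ⟨by
        intro y hy
        rcases List.mem_cons.mp hy with rfl | hy
        · exact h1
        · exact lt_trans h1 (hx y hy), h⟩
    · exact h
    · refine List.pairwise_cons.mpr ⟨?_, ih hxs⟩
      intro y hy
      rcases pvInsNew_mem.mp hy with rfl | hy
      · exact lt_of_le_of_ne (le_of_not_gt h1) (Ne.symm h2)
      · exact hx y hy

theorem pvInsNew_eq_of_mem {d : String} {L : List String}
    (h : L.Pairwise (· < ·)) (hm : d ∈ L) : pvInsNew d L = L := by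
  induction L with
  | nil => simp at hm
  | cons x xs ih =>
    rcases List.pairwise_cons.mp h with ⟨hx, hxs⟩
    rcases List.mem_cons.mp hm with rfl | hm
    · simp [pvInsNew]
    · have hxd : x < d := hx d hm
      simp only [pvInsNew]
      rw [if_neg (by exact fun hc => absurd (lt_trans hxd hc) (lt_irrefl x)),
          if_neg (by rintro rfl; exact absurd hxd (lt_irrefl d)), ih hxs hm]

theorem pvInsNew_perm_of_not_mem {d : String} {L : List String}
    (hm : d ∉ L) : (pvInsNew d L).Perm (d :: L) := by
  induction L with
  | nil => simp [pvInsNew]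
  | cons x xs ih =>
    have hdx : d ≠ x := fun h => hm (h ▸ List.mem_cons_self ..)
    have hdxs : d ∉ xs := fun h => hm (List.mem_cons_of_mem _ h)
    simp only [pvInsNew, if_neg hdx]
    split_ifs with h1
    · exact List.Perm.refl _
    · exact ((ih hdxs).cons x).trans (List.Perm.swap d x xs)

-- one pvInsNew step matches one Set.add step, given the sorted-perm invariant
theorem pv_step {d : String} {L s : List String}
    (hp : L.Pairwise (· < ·)) (hperm : L.Perm s) :
    (pvInsNew d L).Pairwise (· < ·) ∧ (pvInsNew d L).Perm (PySem.Set.add s d) := by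
  refine ⟨pvInsNew_pairwise hp, ?_⟩
  by_cases hm : d ∈ L
  · have hs : PySem.Set.contains s d = true :=
      (PySem.Set.contains_iff s d).mpr (hperm.mem_iff.mp hm)
    rw [pvInsNew_eq_of_mem hp hm]
    simp only [PySem.Set.add, hs, if_true]
    exact hperm
  · have hs : PySem.Set.contains s d = false := by
      rw [Bool.eq_false_iff]
      intro hc
      exact hm (hperm.mem_iff.mpr ((PySem.Set.contains_iff s d).mp hc))
    simp only [PySem.Set.add, hs, Bool.false_eq_true, if_false]
    exact (pvInsNew_perm_of_not_mem hm).trans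
      ((hperm.cons d).trans (List.perm_append_singleton d s).symm)

-- the inner loop over one keyword's domains preserves the invariant
theorem pv_inner (ds : List String) {L s : List String}
    (hp : L.Pairwise (· < ·)) (hperm : L.Perm s) :
    (ds.foldl (fun acc d => pvInsNew d acc) L).Pairwise (· < ·) ∧
    (ds.foldl (fun acc d => pvInsNew d acc) L).Perm (ds.foldl PySem.Set.add s) := by
  induction ds generalizing L s with
  | nil => exact ⟨hp, hperm⟩
  | cons d ds ih =>
    obtain ⟨h1, h2⟩ := pv_step (d := d) hp hperm
    exact ih h1 h2

-- the outer loop over keyword_hints preserves the invariant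
theorem pv_outer (text : String) (kh : List (String × List String)) {L s : List String}
    (hp : L.Pairwise (· < ·)) (hperm : L.Perm s) :
    (kh.foldl (fun out p => if PySem.Str.isIn (PySem.Str.lower p.1) text then
        p.2.foldl (fun acc d => pvInsNew d acc) out else out) L).Pairwise (· < ·) ∧
    (kh.foldl (fun out p => if PySem.Str.isIn (PySem.Str.lower p.1) text then
        p.2.foldl (fun acc d => pvInsNew d acc) out else out) L).Perm
      (kh.foldl (fun t p => if PySem.Str.isIn (PySem.Str.lower p.1) text then
        p.2.foldl PySem.Set.add t else t) s) := by
  induction kh generalizing L s with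
  | nil => exact ⟨hp, hperm⟩
  | cons p kh ih =>
    simp only [List.foldl_cons]
    by_cases hc : PySem.Str.isIn (PySem.Str.lower p.1) text = true
    · rw [if_pos hc, if_pos hc]
      obtain ⟨h1, h2⟩ := pv_inner p.2 hp hperm
      exact ih h1 h2
    · rw [if_neg hc, if_neg hc]
      exact ih hp hperm

-- ===== VERDICT (by name: the statement is the Claim_ definition above) =====
theorem infer_domain_from_content_spec : Claim_equal_infer_domain_from_content := by
  intro contents keyword_hints _
  unfold Spec_infer_domain_from_content infer_domain_from_content infer_domain_from_content_alt
  dsimp only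
  obtain ⟨hp, hperm⟩ := pv_outer (PySem.Str.lower (PySem.Str.join " " contents)) keyword_hints
    (L := []) (s := PySem.Set.empty) (List.Pairwise.nil) (List.Perm.refl _)
  exact (PySem.List.sorted_eq_of_perm_of_pairwise_lt _ _ (fun x => x) hperm hp)
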